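-- pv_equiv track=rewrite | github.com/anan-ya-y/advent-of-code | utils.py | get_n_most_frequent
-- ===== SOURCE A (Python) =====
-- def get_frequencies(input):
--     freqs = {}
--     for i in input:
--         if i not in freqs:
--             freqs[i] = 0
--         freqs[i] += 1
--     return freqs
--
-- def get_n_most_frequent(input, n):
--     freqs = get_frequencies(input)
--     freqs = list(freqs.items())
--     freqs.sort(key=lambda x: x[1], reverse=True) # most frequently first
--
--     ans = []
--     i = 0
--     while i < len(freqs) and len(ans) < n:
--         freq = freqs[i][1]
--         all_in = [x for x in freqs if x[1] == freq]
--         ans.extend(all_in)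
--         i += len(all_in)
--     return ans
-- ===== SOURCE B (Python) =====
-- def get_n_most_frequent(input, n):
--     counts = {}
--     for x in input:
--         counts[x] = counts.get(x, 0) + 1
--     items = sorted(counts.items(), key=lambda kv: kv[1], reverse=True)
--     if n <= 0 or not items:
--         return []
--     t = items[min(n, len(items)) - 1][1]
--     return [kv for kv in items if kv[1] >= t]
-- ===== Notes on version B (the rewrite author's own statement) =====
-- stated objective: alternative
-- what changed: A loops over the sorted frequency list collecting whole equal-frequency buckets, rescanning the entire list once per bucket, until n items are gathered; B instead reads the frequency at position min(n,k)-1 of the sorted list as a threshold and emits all items with count >= that threshold in a single filter pass.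
import Mathlib
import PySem

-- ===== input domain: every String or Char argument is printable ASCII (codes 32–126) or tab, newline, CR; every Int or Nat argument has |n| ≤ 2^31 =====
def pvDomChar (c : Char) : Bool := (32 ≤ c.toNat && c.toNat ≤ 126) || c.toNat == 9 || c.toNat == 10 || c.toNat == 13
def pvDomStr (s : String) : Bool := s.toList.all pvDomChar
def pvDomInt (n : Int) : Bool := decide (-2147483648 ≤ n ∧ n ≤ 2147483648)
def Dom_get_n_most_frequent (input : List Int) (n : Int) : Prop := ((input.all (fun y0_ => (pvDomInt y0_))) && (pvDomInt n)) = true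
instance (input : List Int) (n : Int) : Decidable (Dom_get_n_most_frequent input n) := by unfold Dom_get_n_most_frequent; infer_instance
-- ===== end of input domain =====

-- B replaces A's bucket-by-bucket rescans of the sorted frequency list by a single
-- threshold filter over it (alternative algorithm, same measured cost).


-- ===== PORT A =====
-- get_frequencies: dict counting loop (`if i not in freqs: freqs[i] = 0; freqs[i] += 1`)
def get_frequencies (input : List Int) : PySem.Dict Int Int :=
  input.foldl (fun freqs i =>
    let freqs2 := if freqs.contains i then freqs else freqs.insert i 0
    freqs2.modify i 0 (· + 1)) PySem.Dict.empty

-- A's while loop: collect whole equal-frequency buckets (each by a full rescan) until n items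
-- (freqs[i]: i is always in range here, guarded by i < len, so getD's default is never used)
def loopA (freqs : List (Int × Int)) (n : Int) (ans : List (Int × Int)) (i : Nat) :
    List (Int × Int) :=
  if i < freqs.length ∧ (ans.length : Int) < n then
    let freq := (freqs.getD i (0, 0)).2
    let all_in := freqs.filter (fun x => x.2 == freq)
    loopA freqs n (ans ++ all_in) (i + all_in.length)
  else ans
termination_by freqs.length - i
decreasing_by
  simp only [List.unattach_filter, List.unattach_attach]
  have hmem : freqs.getD i (0, 0) ∈ freqs.filter (fun x => x.2 == (freqs.getD i (0, 0)).2) := by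
    refine List.mem_filter.mpr ⟨?_, by simp⟩
    rw [List.getD_eq_getElem _ _ (by omega)]
    exact List.getElem_mem _
  have hp : 0 < (freqs.filter (fun x => x.2 == (freqs.getD i (0, 0)).2)).length :=
    List.length_pos_of_mem hmem
  omega

def get_n_most_frequent (input : List Int) (n : Int) : List (Int × Int) :=
  let freqs := (get_frequencies input).items
  let freqs := PySem.List.sorted freqs (fun x => x.2) true
  loopA freqs n [] 0

-- ===== PORT B =====
-- B: count with get-default, sort once, read the count at position min(n,k)-1 of the
-- sorted list as a threshold (that index is always in range there, so getD's default
-- is never used), and keep every item whose count reaches it.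
def get_n_most_frequent_alt (input : List Int) (n : Int) : List (Int × Int) :=
  let counts := input.foldl (fun d x => d.insert x (d.getD x 0 + 1)) PySem.Dict.empty
  let items := PySem.List.sorted counts.items (fun kv => kv.2) true
  if n ≤ 0 ∨ items = [] then []
  else
    let t := (items.getD (min n (items.length : Int) - 1).toNat (0, 0)).2
    items.filter (fun kv => decide (t ≤ kv.2))

-- ===== PRECONDITION & SPEC =====
def Spec_get_n_most_frequent (input : List Int) (n : Int) (out : List (Int × Int)) : Prop := out = get_n_most_frequent_alt input n
instance (input : List Int) (n : Int) (out : List (Int × Int)) : Decidable (Spec_get_n_most_frequent input n out) := by unfold Spec_get_n_most_frequent; infer_instance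

-- ===== CLAIM (what is proved, stated in full; the proofs are below) =====
def Claim_equal_get_n_most_frequent : Prop := ∀ (input : List Int) (n : Int), Dom_get_n_most_frequent input n → Spec_get_n_most_frequent input n (get_n_most_frequent input n)

-- ===== LEMMAS AND PROOFS =====

-- A's counting step equals the plain insert-with-default step (inserting 0 first changes nothing)
lemma stepA_eq (d : PySem.Dict Int Int) (i : Int) :
    (if d.contains i then d else d.insert i 0).modify i 0 (· + 1) = d.modify i 0 (· + 1) := by
  by_cases h : d.contains i
  · simp [h]
  · have h' : d.contains i = false := by simpa using h
    have e1 : d.getD i 0 = 0 := PySem.Dict.getD_of_not_contains d (0 : Int) h'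
    simp [PySem.Dict.modify, h', PySem.Dict.insert_insert_self, e1]

lemma modify_eq_insert (d : PySem.Dict Int Int) (x : Int) :
    d.modify x 0 (· + 1) = d.insert x (d.getD x 0 + 1) := by
  by_cases h : d.contains x
  · apply PySem.Dict.ext
    simp [PySem.Dict.modify, h]
  · have h' : d.contains x = false := by simpa using h
    have e1 : d.getD x 0 = 0 := PySem.Dict.getD_of_not_contains d (0 : Int) h'
    simp [PySem.Dict.modify, h', e1]

-- A's counting dict equals B's counting dict
lemma freqA_eq (input : List Int) :
    get_frequencies input
      = input.foldl (fun d x => d.insert x (d.getD x 0 + 1)) PySem.Dict.empty := by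
  unfold get_frequencies
  have key : ∀ (l : List Int) (d : PySem.Dict Int Int),
      l.foldl (fun freqs i =>
        let freqs2 := if freqs.contains i then freqs else freqs.insert i 0
        freqs2.modify i 0 (· + 1)) d
      = l.foldl (fun d x => d.insert x (d.getD x 0 + 1)) d := by
    intro l
    induction l with
    | nil => intro d; rfl
    | cons a t ih =>
      intro d
      simp only [List.foldl_cons]
      rw [show (let freqs2 := if d.contains a then d else d.insert a 0
                freqs2.modify a 0 (· + 1)) = d.insert a (d.getD a 0 + 1) from
            (stepA_eq d a).trans (modify_eq_insert d a)]
      exact ih _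
  exact key input PySem.Dict.empty

-- in a list sorted descending by .2, a monotone-downward filter is an initial segment
lemma filter_eq_takeWhile_of_mono (p : Int × Int → Bool) (L : List (Int × Int))
    (hP : L.Pairwise (fun a b => b.2 ≤ a.2))
    (hmono : ∀ a b : Int × Int, b.2 ≤ a.2 → p b = true → p a = true) :
    L.filter p = L.takeWhile p := by
  induction L with
  | nil => rfl
  | cons a l ih =>
    rcases List.pairwise_cons.mp hP with ⟨ha, hP'⟩
    by_cases hp : p a = true
    · simp [List.filter_cons, List.takeWhile_cons, hp, ih hP']
    · have hall : ∀ b ∈ l, ¬ p b = true := fun b hb hpb => hp (hmono a b (ha b hb) hpb)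
      simp [List.filter_cons, List.takeWhile_cons, hp, List.filter_eq_nil_iff.mpr hall]

-- in a list sorted descending by .2, the >f part is followed exactly by the =f part
lemma filter_split (L : List (Int × Int)) (hP : L.Pairwise (fun a b => b.2 ≤ a.2)) (f : Int) :
    L.filter (fun x => decide (f < x.2)) ++ L.filter (fun x => x.2 == f)
      = L.filter (fun x => decide (f ≤ x.2)) := by
  induction L with
  | nil => rfl
  | cons a l ih =>
    rcases List.pairwise_cons.mp hP with ⟨ha, hP'⟩
    rcases lt_trichotomy f a.2 with h | h | h
    · have e1 : decide (f < a.2) = true := by simp [h]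
      have e2 : (a.2 == f) = false := by simp; omega
      have e3 : decide (f ≤ a.2) = true := by simp; omega
      simp [List.filter_cons, e1, e2, e3, List.cons_append, ih hP']
    · have h1 : ¬ (f < a.2) := by omega
      have hgl : l.filter (fun x => decide (f < x.2)) = [] :=
        List.filter_eq_nil_iff.mpr (fun b hb => by
          have := ha b hb; simp only [decide_eq_true_eq]; omega)
      have heqge : l.filter (fun x => x.2 == f) = l.filter (fun x => decide (f ≤ x.2)) := by
        apply List.filter_congr
        intro b hb
        have hba := ha b hb
        by_cases hbf : b.2 = f
        · simp [hbf]
        · have : ¬ f ≤ b.2 := by omega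
          simp [hbf, this]
      have hfa : f ≤ a.2 := by omega
      simp [List.filter_cons, h1, show (a.2 == f) = true by simp [h.symm], hgl, heqge, hfa]
    · have hge : (a :: l).filter (fun x => decide (f ≤ x.2)) = [] :=
        List.filter_eq_nil_iff.mpr (by
          intro b hb
          rcases List.mem_cons.mp hb with rfl | hb
          · simp only [decide_eq_true_eq]; omega
          · have := ha b hb; simp only [decide_eq_true_eq]; omega)
      have hgt : (a :: l).filter (fun x => decide (f < x.2)) = [] :=
        List.filter_eq_nil_iff.mpr (by
          intro b hb
          rcases List.mem_cons.mp hb with rfl | hb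
          · simp only [decide_eq_true_eq]; omega
          · have := ha b hb; simp only [decide_eq_true_eq]; omega)
      have heq : (a :: l).filter (fun x => x.2 == f) = [] :=
        List.filter_eq_nil_iff.mpr (by
          intro b hb
          rcases List.mem_cons.mp hb with rfl | hb
          · simp only [beq_iff_eq]; omega
          · have := ha b hb; simp only [beq_iff_eq]; omega)
      simp [hge, hgt, heq]

lemma last_le (L : List (Int × Int)) (hP : L.Pairwise (fun a b => b.2 ≤ a.2)) (h : L ≠ []) :
    ∀ x ∈ L, (L.getLast h).2 ≤ x.2 := by
  induction L with
  | nil => exact absurd rfl h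
  | cons a l ih =>
    rcases List.pairwise_cons.mp hP with ⟨ha, hP'⟩
    intro x hx
    by_cases hl : l = []
    · subst hl; simp at hx; subst hx; simp
    · rw [List.getLast_cons hl]
      rcases List.mem_cons.mp hx with rfl | hx
      · exact ha _ (List.getLast_mem hl)
      · exact ih hP' hl x hx

lemma dropWhile_head_false (p : Int × Int → Bool) (L : List (Int × Int)) (c : Int × Int)
    (rest : List (Int × Int)) (h : L.dropWhile p = c :: rest) : p c = false := by
  induction L with
  | nil => simp at h
  | cons a l ih =>
    rw [List.dropWhile_cons] at h
    split at h
    · exact ih h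
    · next hp => cases h; simpa using hp

lemma drop_length_takeWhile (p : Int × Int → Bool) (L : List (Int × Int)) :
    L.drop (L.takeWhile p).length = L.dropWhile p := by
  induction L with
  | nil => rfl
  | cons a l ih =>
    rw [List.takeWhile_cons, List.dropWhile_cons]
    split
    · simpa using ih
    · simp

-- when A's loop stops, its accumulator is exactly B's threshold filter
lemma loopA_exit (L : List (Int × Int)) (n : Int)
    (hP : L.Pairwise (fun a b => b.2 ≤ a.2)) (hn : 0 < n)
    (g : Int) (ans : List (Int × Int)) (i : Nat)
    (hans : ans = L.filter (fun x => decide (g ≤ x.2)))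
    (hi : i = ans.length)
    (hlt : ((L.filter (fun x => decide (g < x.2))).length : Int) < n)
    (hstop : ¬ (i < L.length ∧ (ans.length : Int) < n)) :
    ans = L.filter (fun x => decide ((L.getD (min n (L.length : Int) - 1).toNat (0, 0)).2 ≤ x.2)) := by
  have hTW : ans = L.takeWhile (fun x => decide (g ≤ x.2)) :=
    hans.trans (filter_eq_takeWhile_of_mono _ L hP (by
      intro a b hba hpb; simp only [decide_eq_true_eq] at *; omega))
  have hpre : ans <+: L := hTW ▸ List.takeWhile_prefix _
  have htake : L.take ans.length = ans := List.prefix_iff_eq_take.mp hpre ▸ rfl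
  have hlen : ans.length ≤ L.length := hpre.length_le
  by_cases hc : (ans.length : Int) < n
  · -- then i ≥ L.length, so ans is all of L, and L is shorter than n
    have hiL : ¬ i < L.length := fun h => hstop ⟨h, hc⟩
    have hieq : ans.length = L.length := by omega
    have hansL : ans = L := by
      rw [← htake, hieq, List.take_length]
    by_cases hLnil : L = []
    · simp [hansL, hLnil]
    · have hLlt : (L.length : Int) < n := hieq ▸ hc
      have hmin : min n (L.length : Int) = (L.length : Int) := by omega
      have hpnat : (min n (L.length : Int) - 1).toNat = L.length - 1 := by
        rw [hmin]
        have : 0 < L.length := List.length_pos_iff.mpr hLnil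
        omega
      have hplt : L.length - 1 < L.length := by
        have : 0 < L.length := List.length_pos_iff.mpr hLnil
        omega
      have hlast : L.getD (L.length - 1) (0, 0) = L.getLast hLnil := by
        rw [List.getD_eq_getElem _ _ hplt, List.getLast_eq_getElem]
      rw [hpnat, hlast, hansL]
      exact (List.filter_eq_self.mpr (fun x hx => by
        simp only [decide_eq_true_eq]
        exact last_le L hP hLnil x hx)).symm
  · -- n items were reached: the threshold element's count is exactly g
    have hn_le : n ≤ (ans.length : Int) := by omega
    have hmin : min n (L.length : Int) = n := by
      have : (ans.length : Int) ≤ (L.length : Int) := by exact_mod_cast hlen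
      omega
    set pnat := (min n (L.length : Int) - 1).toNat with hpnat_def
    have hpnat : (pnat : Int) = n - 1 := by rw [hpnat_def, hmin]; omega
    have hp_lt : pnat < ans.length := by omega
    have hp_lt_L : pnat < L.length := by omega
    have hj : ((L.filter (fun x => decide (g < x.2))).length : Int) ≤ (pnat : Int) := by omega
    have hsplit := filter_split L hP g
    have hgetans : L[pnat]'hp_lt_L = ans[pnat]'hp_lt := (hpre.getElem hp_lt).symm
    have hmem2 : ans[pnat]'hp_lt ∈ L.filter (fun x => x.2 == g) := by
      have hsp : ans = L.filter (fun x => decide (g < x.2)) ++ L.filter (fun x => x.2 == g) := by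
        rw [hsplit, hans]
      have hjle : (L.filter (fun x => decide (g < x.2))).length ≤ pnat := by
        exact_mod_cast hj
      rw [List.getElem_of_eq hsp]
      rw [List.getElem_append_right hjle]
      exact List.getElem_mem _
    have hg2 : (ans[pnat]'hp_lt).2 = g := by
      have := (List.mem_filter.mp hmem2).2
      simpa using this
    have ht : (L.getD pnat (0, 0)).2 = g := by
      rw [List.getD_eq_getElem _ _ hp_lt_L, hgetans, hg2]
    rw [ht]
    exact hans

-- the heart: A's bucket loop on a descending list computes B's threshold filter
lemma loopA_eq (L : List (Int × Int)) (n : Int)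
    (hP : L.Pairwise (fun a b => b.2 ≤ a.2)) (hn : 0 < n) :
    ∀ (fuel : Nat) (g : Int) (ans : List (Int × Int)) (i : Nat),
      L.length - i ≤ fuel →
      ans = L.filter (fun x => decide (g ≤ x.2)) →
      i = ans.length →
      ((L.filter (fun x => decide (g < x.2))).length : Int) < n →
      loopA L n ans i
        = L.filter (fun x => decide ((L.getD (min n (L.length : Int) - 1).toNat (0, 0)).2 ≤ x.2)) := by
  intro fuel
  induction fuel with
  | zero =>
    intro g ans i hfuel hans hi hlt
    have hstop : ¬ (i < L.length ∧ (ans.length : Int) < n) := by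
      intro ⟨h1, _⟩; omega
    rw [loopA, if_neg hstop]
    exact loopA_exit L n hP hn g ans i hans hi hlt hstop
  | succ fuel ih =>
    intro g ans i hfuel hans hi hlt
    by_cases hcond : i < L.length ∧ (ans.length : Int) < n
    · rw [loopA, if_pos hcond]
      -- identify the head of the remaining (unclaimed) part of L
      have hTW : ans = L.takeWhile (fun x => decide (g ≤ x.2)) :=
        hans.trans (filter_eq_takeWhile_of_mono _ L hP (by
          intro a b hba hpb; simp only [decide_eq_true_eq] at *; omega))
      have hdrop : L.drop i = L.dropWhile (fun x => decide (g ≤ x.2)) := by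
        rw [hi, hTW]
        exact drop_length_takeWhile _ L
      obtain ⟨c, rest, hcr⟩ : ∃ c rest, L.dropWhile (fun x => decide (g ≤ x.2)) = c :: rest := by
        rcases h : L.dropWhile (fun x => decide (g ≤ x.2)) with _ | ⟨c, rest⟩
        · rw [← hdrop] at h
          have := List.drop_eq_nil_iff.mp h
          omega
        · exact ⟨c, rest, h⟩
      have hdc : L.drop i = c :: rest := hdrop.trans hcr
      have hci : L.getD i (0, 0) = c := by
        rw [List.getD_eq_getElem _ _ hcond.1]
        have e1 : (L.drop i)[0]'(by rw [hdc]; simp) = c := by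
          rw [List.getElem_of_eq hdc]
          simp
        have e2 : (L.drop i)[0]'(by rw [hdc]; simp) = L[i]'(hcond.1) := by
          rw [List.getElem_drop]
          simp
        rw [← e2, e1]
      have hpc : c.2 < g := by
        have := dropWhile_head_false _ L c rest hcr
        simpa using this
      -- what was collected so far is exactly the part strictly above the new frequency
      have hgt_eq : L.filter (fun x => decide (c.2 < x.2)) = ans := by
        conv_lhs => rw [← List.takeWhile_append_dropWhile (p := fun x => decide (g ≤ x.2)) (l := L)]
        rw [List.filter_append]
        have part1 : (L.takeWhile (fun x => decide (g ≤ x.2))).filter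
            (fun x => decide (c.2 < x.2)) = L.takeWhile (fun x => decide (g ≤ x.2)) :=
          List.filter_eq_self.mpr (fun b hb => by
            have := List.mem_takeWhile_imp hb
            simp only [decide_eq_true_eq] at *
            omega)
        have part2 : (L.dropWhile (fun x => decide (g ≤ x.2))).filter
            (fun x => decide (c.2 < x.2)) = [] := by
          rw [hcr]
          have hPd : (c :: rest).Pairwise (fun a b : Int × Int => b.2 ≤ a.2) := by
            rw [← hcr]
            exact hP.sublist (List.dropWhile_sublist _)
          rcases List.pairwise_cons.mp hPd with ⟨hcrest, _⟩
          refine List.filter_eq_nil_iff.mpr ?_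
          intro b hb
          rcases List.mem_cons.mp hb with rfl | hb
          · simp
          · have := hcrest b hb
            simp only [decide_eq_true_eq]
            omega
        rw [part1, part2, List.append_nil, ← hTW]
      have hnewans : ans ++ L.filter (fun x => x.2 == c.2)
          = L.filter (fun x => decide (c.2 ≤ x.2)) := by
        rw [← hgt_eq]
        exact filter_split L hP c.2
      have hcmem : c ∈ L.filter (fun x => x.2 == c.2) := by
        refine List.mem_filter.mpr ⟨?_, by simp⟩
        rw [← hci, List.getD_eq_getElem _ _ hcond.1]
        exact List.getElem_mem _
      have hpos : 0 < (L.filter (fun x => x.2 == c.2)).length := List.length_pos_of_mem hcmem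
      rw [hci]
      exact ih c.2 (ans ++ L.filter (fun x => x.2 == c.2))
        (i + (L.filter (fun x => x.2 == c.2)).length)
        (by omega) hnewans (by simp [hi]) (by rw [hgt_eq]; exact hcond.2)
    · rw [loopA, if_neg hcond]
      exact loopA_exit L n hP hn g ans i hans hi hlt hcond

-- every count in the sorted list is below the head's count plus one
lemma head_bound (L : List (Int × Int)) (c : Int × Int) (rest : List (Int × Int))
    (hP : L.Pairwise (fun a b => b.2 ≤ a.2)) (hL : L = c :: rest) :
    ∀ x ∈ L, x.2 ≤ c.2 := by
  subst hL
  intro x hx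
  rcases List.pairwise_cons.mp hP with ⟨ha, _⟩
  rcases List.mem_cons.mp hx with rfl | hx
  · exact le_rfl
  · exact ha x hx

-- ===== VERDICT (by name: the statement is the Claim_ definition above) =====
theorem get_n_most_frequent_spec : Claim_equal_get_n_most_frequent := by
  intro input n _
  unfold Spec_get_n_most_frequent get_n_most_frequent get_n_most_frequent_alt
  rw [freqA_eq]
  dsimp only
  set L := PySem.List.sorted
      (input.foldl (fun d x => d.insert x (d.getD x 0 + 1)) PySem.Dict.empty).items
      (fun kv : Int × Int => kv.2) true with hL
  have hP : L.Pairwise (fun a b : Int × Int => b.2 ≤ a.2) :=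
    PySem.List.sorted_pairwise_rev _ _
  by_cases hn : n ≤ 0
  · rw [if_pos (Or.inl hn), loopA, if_neg (by rintro ⟨_, h2⟩; simp at h2; omega)]
  · by_cases hLnil : L = []
    · rw [if_pos (Or.inr hLnil), loopA,
        if_neg (by rintro ⟨h1, _⟩; rw [hLnil] at h1; simp at h1)]
    · obtain ⟨c, rest, hcons⟩ := List.exists_cons_of_ne_nil hLnil
      rw [if_neg (by rintro (h | h); exacts [hn h, hLnil h])]
      refine loopA_eq L n hP (by omega) L.length (c.2 + 1) [] 0 (by omega) ?_ rfl ?_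
      · symm
        refine List.filter_eq_nil_iff.mpr ?_
        intro b hb
        have := head_bound L c rest hP hcons b hb
        simp only [decide_eq_true_eq]
        omega
      · have he : L.filter (fun x => decide (c.2 + 1 < x.2)) = [] :=
          List.filter_eq_nil_iff.mpr (fun b hb => by
            have := head_bound L c rest hP hcons b hb
            simp only [decide_eq_true_eq]
            omega)
        rw [he]
        simpa using hn
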